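-- pv_equiv track=rewrite | github.com/lshepard/advent-of-code | 2022/day07.py | directory_names
-- ===== SOURCE A (Python) =====
-- def directory_names(file_name):
--     """All the directories that contain this file. let's do fully qualified"""
--
--     start = 0
--     dirs = []
--     while True:
--         i = file_name.find("/", start)
--         if i == -1:
--             break
--         dirs.append(file_name[:i])
--         start = i+1
--     return dirs
-- ===== SOURCE B (Python) =====
-- def directory_names(file_name):
--     """All the directories that contain this file. let's do fully qualified"""
--     parts = file_name.split("/")
--     dirs = []
--     acc = parts[0]
--     for part in parts[1:]:
--         dirs.append(acc)
--         acc = acc + "/" + part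
--     return dirs
-- ===== Notes on version B (the rewrite author's own statement) =====
-- stated objective: alternative
-- what changed: Instead of scanning the original string with str.find and slicing a prefix at each slash, B splits the string once into slash-separated components with str.split and rebuilds each directory by concatenating the components accumulated so far.
import Mathlib
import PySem

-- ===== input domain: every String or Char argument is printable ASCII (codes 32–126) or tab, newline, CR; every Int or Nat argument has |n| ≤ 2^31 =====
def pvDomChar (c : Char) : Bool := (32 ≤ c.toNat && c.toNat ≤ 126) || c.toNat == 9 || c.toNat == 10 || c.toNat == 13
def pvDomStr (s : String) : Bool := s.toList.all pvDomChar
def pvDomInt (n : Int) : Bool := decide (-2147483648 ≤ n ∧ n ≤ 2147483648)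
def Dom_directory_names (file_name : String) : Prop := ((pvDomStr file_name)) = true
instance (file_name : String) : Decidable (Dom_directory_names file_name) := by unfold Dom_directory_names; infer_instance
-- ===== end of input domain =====

-- B replaces A's find-based slicing of the original string by split("/") into
-- components and rebuilding each directory by concatenating pieces ('alternative').

-- ===== PORT A =====
-- A's while-True loop: find the next '/' from `start`; fuel makes it total
-- (fuel = |s| + 1 suffices since `start` strictly increases and stays ≤ |s|).
def dnLoopA (s : String) : Nat → Int → List String → List String
  | 0, _, dirs => dirs
  | fuel + 1, start, dirs =>
    let i := PySem.Str.findFrom s "/" start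
    if i = -1 then dirs
    else dnLoopA s fuel (i + 1) (dirs ++ [PySem.Str.slice s none (some i)])

def directory_names (file_name : String) : List String :=
  dnLoopA file_name (file_name.toList.length + 1) 0 []

-- ===== PORT B =====
-- the for-loop of Source B: dirs.append(acc); acc = acc + "/" + part
def dnLoopB : List String → String → List String → List String
  | [], _, dirs => dirs
  | p :: rest, acc, dirs => dnLoopB rest (acc ++ "/" ++ p) (dirs ++ [acc])

-- parts = file_name.split("/"); acc = parts[0]; loop over parts[1:]
def directory_names_alt (file_name : String) : List String :=
  match PySem.Str.split? file_name "/" with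
  | none => []          -- unreachable: the separator "/" is nonempty
  | some [] => []       -- unreachable: str.split never returns an empty list
  | some (p :: rest) => dnLoopB rest p []

-- ===== PRECONDITION & SPEC =====
def Spec_directory_names (file_name : String) (out : List String) : Prop := out = directory_names_alt file_name
instance (file_name : String) (out : List String) : Decidable (Spec_directory_names file_name out) := by unfold Spec_directory_names; infer_instance

-- ===== CLAIM (what is proved, stated in full; the proofs are below) =====
def Claim_equal_directory_names : Prop := ∀ (file_name : String), Dom_directory_names file_name → Spec_directory_names file_name (directory_names file_name)

-- ===== LEMMAS AND PROOFS =====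

-- canonical value at char level: the prefixes of t taken at every slash
def cdC : List Char → List (List Char)
  | [] => []
  | c :: rest => (if c = '/' then [([] : List Char)] else []) ++ (cdC rest).map (c :: ·)

-- char-level split on '/' (Python str.split("/"))
def splitC : List Char → List (List Char)
  | [] => [[]]
  | c :: rest =>
    if c = '/' then [] :: splitC rest
    else
      match splitC rest with
      | [] => [[c]]
      | p :: ps => (c :: p) :: ps

-- char-level image of B's loop: the accumulated prefixes
def prefixJoinsC : List (List Char) → List Char → List (List Char)
  | [], _ => []
  | p :: rest, acc => acc :: prefixJoinsC rest (acc ++ '/' :: p)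

-- canonical value used to prove A: prefixes of `s` at every slash of `t = s.toList.drop n`
def dnScan (s : String) : List Char → Nat → List String
  | [], _ => []
  | c :: rest, n =>
    (if c = '/' then [PySem.Str.slice s none (some (n : Int))] else []) ++ dnScan s rest (n + 1)

lemma dnScan_no_slash (s : String) (t : List Char) (n : Nat) (h : '/' ∉ t) :
    dnScan s t n = [] := by
  induction t generalizing n with
  | nil => rfl
  | cons c rest ih =>
    simp only [List.mem_cons, not_or] at h
    simp [dnScan, Ne.symm h.1, ih _ h.2]

lemma dnScan_append (s : String) (t u : List Char) (n : Nat) :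
    dnScan s (t ++ u) n = dnScan s t n ++ dnScan s u (n + t.length) := by
  induction t generalizing n with
  | nil => simp [dnScan]
  | cons c rest ih =>
    simp [dnScan, ih, List.append_assoc, Nat.add_assoc, Nat.add_comm 1]

lemma singleton_prefix_iff {c : Char} {t : List Char} :
    [c] <+: t ↔ ∃ rest, t = c :: rest := by
  cases t with
  | nil => simp
  | cons d rest =>
    constructor
    · rintro ⟨u, hu⟩
      simp only [List.cons_append, List.nil_append, List.cons.injEq] at hu
      exact ⟨rest, by rw [hu.1]⟩
    · rintro ⟨r, hr⟩
      cases hr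
      exact ⟨rest, rfl⟩

lemma singleton_infix_iff {c : Char} {t : List Char} :
    [c] <:+: t ↔ c ∈ t := by
  constructor
  · rintro ⟨u, v, rfl⟩; simp
  · intro h
    obtain ⟨u, v, rfl⟩ := List.append_of_mem h
    exact ⟨u, v, by simp⟩

-- A's loop, from any admissible state, produces the scan of the remaining suffix
lemma dnLoopA_eq_scan (s : String) :
    ∀ (fuel start : Nat) (dirs : List String),
      start ≤ s.toList.length → s.toList.length + 1 ≤ fuel + start →
      dnLoopA s fuel (start : Int) dirs = dirs ++ dnScan s (s.toList.drop start) start := by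
  intro fuel
  induction fuel with
  | zero => intro start dirs h1 h2; omega
  | succ fuel ih =>
    intro start dirs h1 h2
    have hfind : PySem.Str.findFrom s "/" (start : Int) =
        PySem.Chars.findFrom s.toList ['/'] (start : Int) := by
      simp [PySem.Str.findFrom_eq]
    by_cases hneg : PySem.Chars.findFrom s.toList ['/'] (start : Int) = -1
    · have hno : '/' ∉ s.toList.drop start := by
        have := (PySem.Chars.findFrom_natCast_eq_neg_one_iff s.toList ['/'] start h1).mp hneg
        exact fun hm => this (singleton_infix_iff.mpr hm)
      simp [dnLoopA, hneg, dnScan_no_slash s _ _ hno]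
    · obtain ⟨hge, hpre, hmin⟩ :=
        PySem.Chars.findFrom_natCast_spec s.toList ['/'] start h1 hneg
      set i := PySem.Chars.findFrom s.toList ['/'] (start : Int) with hi
      obtain ⟨rest, hrest⟩ := singleton_prefix_iff.mp hpre
      have hilt : i.toNat < s.toList.length := by
        have : (s.toList.drop i.toNat).length = rest.length + 1 := by rw [hrest]; simp
        simp only [List.length_drop] at this
        omega
      have hstart_le : start ≤ i.toNat := by omega
      have hchar : s.toList[i.toNat]'hilt = '/' := by
        have h0 : (s.toList.drop i.toNat)[0]'(by rw [hrest]; simp) = '/' := by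
          simp [hrest]
        simpa using h0
      have h1' : s.toList.drop i.toNat = '/' :: s.toList.drop (i.toNat + 1) := by
        rw [List.drop_eq_getElem_cons hilt, hchar]
      have hdecomp : s.toList.drop start =
          (s.toList.drop start).take (i.toNat - start) ++ ('/' :: s.toList.drop (i.toNat + 1)) := by
        calc s.toList.drop start
            = (s.toList.drop start).take (i.toNat - start) ++ (s.toList.drop start).drop (i.toNat - start) := (List.take_append_drop _ _).symm
          _ = _ := by
              rw [List.drop_drop]
              have heq : start + (i.toNat - start) = i.toNat := by omega
              rw [heq, h1']
      have hlen_take : ((s.toList.drop start).take (i.toNat - start)).length = i.toNat - start := by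
        rw [List.length_take, List.length_drop]; omega
      have hno_pre : '/' ∉ (s.toList.drop start).take (i.toNat - start) := by
        intro hm
        obtain ⟨k, hk, hkeq⟩ := List.mem_iff_getElem.mp hm
        have hk' : k < i.toNat - start := by omega
        rw [List.getElem_take, List.getElem_drop] at hkeq
        apply hmin (start + k) (by omega) (by omega)
        rw [singleton_prefix_iff]
        exact ⟨s.toList.drop (start + k + 1), by
          rw [List.drop_eq_getElem_cons (by omega), hkeq]⟩
      have hstep : dnLoopA s (fuel + 1) (start : Int) dirs =
          dnLoopA s fuel ((i.toNat + 1 : Nat) : Int)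
            (dirs ++ [PySem.Str.slice s none (some ((i.toNat : Nat) : Int))]) := by
        have hiv : i = (i.toNat : Int) := by omega
        simp only [dnLoopA, hfind]
        rw [if_neg hneg, ← hiv]
        congr 1
        push_cast; omega
      rw [hstep, ih (i.toNat + 1) _ (by omega) (by omega)]
      rw [hdecomp, dnScan_append, dnScan_no_slash s _ _ hno_pre, hlen_take]
      have : start + (i.toNat - start) = i.toNat := by omega
      simp [dnScan, this, List.append_assoc]

-- the scan of the suffix at n, as char lists, is cdC mapped under take n ++ ·
lemma dnScan_map (s : String) :
    ∀ (t : List Char) (n : Nat), t = s.toList.drop n →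
      (dnScan s t n).map String.toList = (cdC t).map (fun p => s.toList.take n ++ p) := by
  intro t
  induction t with
  | nil => intro n _; rfl
  | cons c rest ih =>
    intro n ht
    have hn : n < s.toList.length := by
      by_contra h
      rw [List.drop_eq_nil_of_le (by omega)] at ht
      simp at ht
    have hcons : c :: rest = s.toList[n] :: s.toList.drop (n + 1) := by
      rw [ht, List.drop_eq_getElem_cons hn]
    obtain ⟨hc, hrest⟩ := List.cons_eq_cons.mp hcons
    have htake : s.toList.take (n + 1) = s.toList.take n ++ [c] := by
      rw [List.take_add_one]
      simp [List.getElem?_eq_getElem hn, ← hc]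
    have hslice : (PySem.Str.slice s none (some (n : Int))).toList = s.toList.take n := by
      rw [PySem.Str.toList_slice, PySem.Chars.slice_eq_listSlice, PySem.List.slice_to_natCast]
    by_cases hcs : c = '/'
    · simp [dnScan, cdC, hcs, ih (n + 1) hrest, htake, Function.comp, hslice]
    · simp [dnScan, cdC, hcs, ih (n + 1) hrest, htake, Function.comp]

lemma splitC_ne_nil : ∀ t : List Char, splitC t ≠ [] := by
  intro t
  cases t with
  | nil => simp [splitC]
  | cons c rest =>
    simp only [splitC]
    split_ifs
    · simp
    · cases h : splitC rest <;> simp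

-- the fuelled splitOn.go of PySem, against the structural splitC
lemma go_eq_splitC :
    ∀ (fuel : Nat) (t cur : List Char) (acc : List (List Char)), t.length ≤ fuel →
      PySem.Chars.splitOn.go ['/'] fuel t cur acc =
        acc.reverse ++ (match splitC t with
                        | [] => [cur.reverse]
                        | p :: ps => (cur.reverse ++ p) :: ps) := by
  intro fuel
  induction fuel with
  | zero =>
    intro t cur acc hlen
    have ht : t = [] := List.eq_nil_of_length_eq_zero (by omega)
    subst ht
    rw [PySem.Chars.splitOn.go.eq_def]
    simp [splitC]
  | succ fuel ih =>
    intro t cur acc hlen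
    cases t with
    | nil =>
      rw [PySem.Chars.splitOn.go.eq_def]
      simp [splitC]
    | cons c rest =>
      rw [PySem.Chars.splitOn.go.eq_def]
      by_cases hc : c = '/'
      · have hpre : List.isPrefixOf ['/'] (c :: rest) = true := by
          simp [List.isPrefixOf, hc]
        simp only [hpre, if_pos, List.length_cons, List.length_nil, List.drop_succ_cons,
          List.drop_zero]
        rw [ih rest [] (cur.reverse :: acc) (by simpa using Nat.le_of_succ_le_succ hlen)]
        cases hsp : splitC rest with
        | nil => exact absurd hsp (splitC_ne_nil rest)
        | cons p ps => simp [splitC, hc, hsp]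
      · have hpre : List.isPrefixOf ['/'] (c :: rest) = false := by
          simp [List.isPrefixOf]
          exact fun h => absurd h.symm hc
        simp only [hpre, Bool.false_eq_true, if_false]
        rw [ih rest (c :: cur) acc (by simpa using Nat.le_of_succ_le_succ hlen)]
        cases hsp : splitC rest with
        | nil => exact absurd hsp (splitC_ne_nil rest)
        | cons p ps => simp [splitC, hc, hsp]

lemma splitOn_eq_splitC (t : List Char) :
    PySem.Chars.splitOn t ['/'] = splitC t := by
  unfold PySem.Chars.splitOn
  rw [go_eq_splitC (t.length + 1) t [] [] (by omega)]
  cases hsp : splitC t with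
  | nil => exact absurd hsp (splitC_ne_nil t)
  | cons p ps => simp

lemma cdC_no_slash (t : List Char) (h : '/' ∉ t) : cdC t = [] := by
  induction t with
  | nil => rfl
  | cons c rest ih =>
    simp only [List.mem_cons, not_or] at h
    simp [cdC, Ne.symm h.1, ih h.2]

lemma splitC_no_slash (t : List Char) (h : '/' ∉ t) : splitC t = [t] := by
  induction t with
  | nil => rfl
  | cons c rest ih =>
    simp only [List.mem_cons, not_or] at h
    simp [splitC, Ne.symm h.1, ih h.2]

lemma cdC_slash (h tl : List Char) (hh : '/' ∉ h) :
    cdC (h ++ '/' :: tl) = h :: (cdC tl).map (h ++ '/' :: ·) := by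
  induction h with
  | nil => simp [cdC]
  | cons c h' ih =>
    simp only [List.mem_cons, not_or] at hh
    simp only [List.cons_append, cdC, Ne.symm hh.1, ih hh.2]
    simp [Function.comp]
  
lemma splitC_slash (h tl : List Char) (hh : '/' ∉ h) :
    splitC (h ++ '/' :: tl) = h :: splitC tl := by
  induction h with
  | nil => simp [splitC]
  | cons c h' ih =>
    simp only [List.mem_cons, not_or] at hh
    simp [splitC, Ne.symm hh.1, ih hh.2]

-- first-slash decomposition of a string containing a slash
lemma slash_decomp (t : List Char) (hm : '/' ∈ t) :
    ∃ h tl, t = h ++ '/' :: tl ∧ '/' ∉ h := by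
  refine ⟨t.takeWhile (· ≠ '/'), (t.dropWhile (· ≠ '/')).tail, ?_, ?_⟩
  · have hd : t.dropWhile (· ≠ '/') ≠ [] := by
      intro hnil
      have := List.takeWhile_append_dropWhile (p := (· ≠ '/')) (l := t)
      rw [hnil, List.append_nil] at this
      rw [← this] at hm
      have := List.mem_takeWhile_imp hm
      simp at this
    have hhead : ¬ ((t.dropWhile (· ≠ '/')).head hd ≠ '/') := by
      simpa using List.head_dropWhile_not (p := (· ≠ '/')) (l := t) hd
    have hslash : (t.dropWhile (· ≠ '/')).head hd = '/' := by simpa using hhead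
    conv_lhs => rw [← List.takeWhile_append_dropWhile (p := (· ≠ '/')) (l := t)]
    rw [← List.cons_head_tail hd, hslash]
    simp
  · intro hmem
    have := List.mem_takeWhile_imp hmem
    simp at this

-- B's accumulated prefixes over splitC, against cdC (strong induction on length)
lemma prefixJoinsC_splitC :
    ∀ (n : Nat) (t acc : List Char), t.length ≤ n →
      prefixJoinsC (splitC t) acc = acc :: (cdC t).map (fun p => acc ++ '/' :: p) := by
  intro n
  induction n with
  | zero =>
    intro t acc hlen
    have ht : t = [] := List.eq_nil_of_length_eq_zero (by omega)
    subst ht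
    simp [splitC, prefixJoinsC, cdC]
  | succ n ih =>
    intro t acc hlen
    by_cases hm : '/' ∈ t
    · obtain ⟨h, tl, rfl, hh⟩ := slash_decomp t hm
      have hlt : tl.length ≤ n := by
        have := hlen
        simp only [List.length_append, List.length_cons] at this
        omega
      rw [splitC_slash h tl hh, cdC_slash h tl hh]
      simp only [prefixJoinsC, ih tl (acc ++ '/' :: h) hlt, List.map_cons, List.map_map]
      simp [Function.comp, List.append_assoc]
    · rw [splitC_no_slash t hm, cdC_no_slash t hm]
      simp [prefixJoinsC]

lemma prefixJoinsC_tail (t : List Char) (p : List Char) (ps : List (List Char))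
    (hsp : splitC t = p :: ps) : prefixJoinsC ps p = cdC t := by
  by_cases hm : '/' ∈ t
  · obtain ⟨h, tl, rfl, hh⟩ := slash_decomp t hm
    rw [splitC_slash h tl hh] at hsp
    obtain ⟨rfl, rfl⟩ : p = h ∧ ps = splitC tl := by
      constructor <;> simp_all
    rw [prefixJoinsC_splitC tl.length tl p le_rfl, cdC_slash p tl hh]
  · rw [splitC_no_slash t hm] at hsp
    obtain ⟨rfl, rfl⟩ : p = t ∧ ps = [] := by constructor <;> simp_all
    rw [cdC_no_slash p hm]
    rfl

-- String-level B loop against the char-level prefixes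
lemma dnLoopB_map (ps : List (List Char)) :
    ∀ (acc : List Char) (dirs : List String),
      (dnLoopB (ps.map String.ofList) (String.ofList acc) dirs).map String.toList =
        dirs.map String.toList ++ prefixJoinsC ps acc := by
  induction ps with
  | nil => intro acc dirs; simp [dnLoopB, prefixJoinsC]
  | cons p rest ih =>
    intro acc dirs
    have hstr : String.ofList acc ++ "/" ++ String.ofList p = String.ofList (acc ++ '/' :: p) := by
      apply String.toList_inj.mp
      simp [String.toList_append]
    simp only [List.map_cons, dnLoopB, hstr, ih]
    simp [prefixJoinsC]

lemma alt_map (s : String) :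
    (directory_names_alt s).map String.toList = cdC s.toList := by
  have hsep : ("/" : String).toList = ['/'] := by decide
  have hsplit : PySem.Str.split? s "/" =
      some ((splitC s.toList).map String.ofList) := by
    simp [PySem.Str.split?, PySem.Chars.split?, hsep, splitOn_eq_splitC]
  unfold directory_names_alt
  rw [hsplit]
  cases hsp : splitC s.toList with
  | nil => exact absurd hsp (splitC_ne_nil s.toList)
  | cons p ps =>
    simp only [List.map_cons]
    rw [show (dnLoopB (ps.map String.ofList) (String.ofList p) []).map String.toList =
        ([] : List String).map String.toList ++ prefixJoinsC ps p from dnLoopB_map ps p []]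
    simp [prefixJoinsC_tail s.toList p ps hsp]

lemma a_map (s : String) :
    (directory_names s).map String.toList = cdC s.toList := by
  unfold directory_names
  have h0 : (0 : Int) = ((0 : Nat) : Int) := rfl
  rw [h0, dnLoopA_eq_scan s (s.toList.length + 1) 0 [] (by omega) (by omega)]
  simp only [List.drop_zero, List.nil_append]
  rw [dnScan_map s s.toList 0 (by simp)]
  simp

-- ===== VERDICT (by name: the statement is the Claim_ definition above) =====
theorem directory_names_spec : Claim_equal_directory_names := by
  intro s _
  unfold Spec_directory_names
  have hinj : Function.Injective (List.map String.toList) :=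
    List.map_injective_iff.mpr (fun a b h => String.toList_inj.mp h)
  exact hinj (by rw [a_map, alt_map])
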